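-- pv_equiv track=rewrite | github.com/andreasblomqvist/simple_simulation | backend/src/services/v2_scenario_converter.py | _extract_baseline_fte
-- ===== SOURCE A (Python) =====
-- from typing import Dict, List, Optional, Any, Union, Tuple
--
-- def _extract_baseline_fte(workforce_data: List[Dict[str, Any]]) -> Dict[str, Dict[str, int]]:
--     """Extract baseline FTE counts from workforce data"""
--     baseline_fte = {}
--
--     for entry in workforce_data:
--         role = entry.get('role', 'Unknown')
--         level = entry.get('level', 'Unknown')
--
--         if role not in baseline_fte:
--             baseline_fte[role] = {}
--         if level not in baseline_fte[role]:
--             baseline_fte[role][level] = 0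
--
--         baseline_fte[role][level] += 1
--
--     return baseline_fte
-- ===== SOURCE B (Python) =====
-- def _extract_baseline_fte(workforce_data):
--     """Extract baseline FTE counts: dedup roles/levels in first-occurrence order, then count."""
--     keys = [(e.get('role', 'Unknown'), e.get('level', 'Unknown')) for e in workforce_data]
--     result = {}
--     for role in dict.fromkeys(r for r, _ in keys):
--         levels = [l for r, l in keys if r == role]
--         result[role] = {l: levels.count(l) for l in dict.fromkeys(levels)}
--     return result
-- ===== Notes on version B (the rewrite author's own statement) =====
-- stated objective: alternative
-- what changed: B replaces A's single interleaved loop that increments a nested dict in place by a declarative two-phase formulation: extract the (role, level) key list once, deduplicate roles and per-role levels in first-occurrence order with dict.fromkeys, and compute each cell as levels.count(l).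
import Mathlib
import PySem

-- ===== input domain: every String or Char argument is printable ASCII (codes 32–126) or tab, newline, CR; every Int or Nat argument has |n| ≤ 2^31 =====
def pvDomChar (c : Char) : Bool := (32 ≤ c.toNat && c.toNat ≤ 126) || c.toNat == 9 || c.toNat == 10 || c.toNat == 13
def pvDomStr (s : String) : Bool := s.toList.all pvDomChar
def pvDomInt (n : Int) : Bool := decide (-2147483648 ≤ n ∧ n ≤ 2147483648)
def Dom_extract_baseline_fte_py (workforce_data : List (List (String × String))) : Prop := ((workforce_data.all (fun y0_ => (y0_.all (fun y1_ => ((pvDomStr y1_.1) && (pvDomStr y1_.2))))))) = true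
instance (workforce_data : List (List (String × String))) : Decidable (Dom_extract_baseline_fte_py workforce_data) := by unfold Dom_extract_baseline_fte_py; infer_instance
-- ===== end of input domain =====

-- One honest line: B is an alternative dedup-and-count formulation of A's nested-dict counting loop; equal return value, no speed claim.

-- ===== PORT A =====
-- entry.get(k, dflt) on a Python dict (association list, Python-dict semantics)
def pvGet (entry : List (String × String)) (k dflt : String) : String :=
  (PySem.Dict.ofList entry).getD k dflt

-- first-match lookup in an association list (Python 'role in d' / 'd[role]')
def alGet {β : Type} (m : List (String × β)) (k : String) : Option β :=
  match m with
  | [] => none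
  | (k', v) :: t => if k' = k then some v else alGet t k

-- in-place write 'd[k] = v' (overwrite keeps position, new keys append)
def alSet {β : Type} (m : List (String × β)) (k : String) (v : β) : List (String × β) :=
  match m with
  | [] => [(k, v)]
  | (k', v') :: t => if k' = k then (k', v) :: t else (k', v') :: alSet t k v

def extract_baseline_fte_py (workforce_data : List (List (String × String))) : List (String × List (String × Int)) :=
  workforce_data.foldl (fun baseline_fte entry =>
    let role := pvGet entry "role" "Unknown"
    let level := pvGet entry "level" "Unknown"
    let baseline_fte := match alGet baseline_fte role with
      | none => alSet baseline_fte role []        -- baseline_fte[role] = {}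
      | some _ => baseline_fte
    let inner := (alGet baseline_fte role).getD []
    let inner := match alGet inner level with
      | none => alSet inner level 0               -- baseline_fte[role][level] = 0
      | some _ => inner
    let inner := alSet inner level ((alGet inner level).getD 0 + 1)   -- += 1
    alSet baseline_fte role inner) []

-- ===== PORT B =====
def extract_baseline_fte_py_alt (workforce_data : List (List (String × String))) : List (String × List (String × Int)) :=
  let keys := workforce_data.map (fun e =>
    ((PySem.Dict.ofList e).getD "role" "Unknown", (PySem.Dict.ofList e).getD "level" "Unknown"))
  (PySem.Set.ofList (keys.map (fun k => k.1))).map (fun role =>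
    let levels := (keys.filter (fun k => k.1 == role)).map (fun k => k.2)
    (role, (PySem.Set.ofList levels).map (fun l => (l, (levels.count l : Int)))))

-- ===== PRECONDITION & SPEC =====
def Spec_extract_baseline_fte_py (workforce_data : List (List (String × String))) (out : List (String × List (String × Int))) : Prop := out = extract_baseline_fte_py_alt workforce_data
instance (workforce_data : List (List (String × String))) (out : List (String × List (String × Int))) : Decidable (Spec_extract_baseline_fte_py workforce_data out) := by unfold Spec_extract_baseline_fte_py; infer_instance

-- ===== CLAIM (what is proved, stated in full; the proofs are below) =====
def Claim_equal_extract_baseline_fte_py : Prop := ∀ (workforce_data : List (List (String × String))), Dom_extract_baseline_fte_py workforce_data → Spec_extract_baseline_fte_py workforce_data (extract_baseline_fte_py workforce_data)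

-- ===== LEMMAS AND PROOFS =====

-- the (role, level) key of an entry
def pvKey (e : List (String × String)) : String × String :=
  ((PySem.Dict.ofList e).getD "role" "Unknown", (PySem.Dict.ofList e).getD "level" "Unknown")

-- the common specification: nested first-occurrence-ordered counts of the key list
def pvNest (ks : List (String × String)) : List (String × List (String × Int)) :=
  (PySem.Set.ofList (ks.map (fun k => k.1))).map (fun r =>
    let lv := (ks.filter (fun k => k.1 == r)).map (fun k => k.2)
    (r, (PySem.Set.ofList lv).map (fun l => (l, (lv.count l : Int)))))

def pvLv (ks : List (String × String)) (r : String) : List String :=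
  (ks.filter (fun k => k.1 == r)).map (fun k => k.2)

def pvInner (ks : List (String × String)) (r : String) : List (String × Int) :=
  (PySem.Set.ofList (pvLv ks r)).map (fun l => (l, ((pvLv ks r).count l : Int)))

theorem pvNest_eq (ks : List (String × String)) :
    pvNest ks = (PySem.Set.ofList (ks.map (fun k => k.1))).map (fun r => (r, pvInner ks r)) := rfl

-- A's loop body, zeta-expanded (definitionally equal to the port's lambda)
def pvStep1 (b : List (String × List (String × Int))) (role : String) :
    List (String × List (String × Int)) :=
  match alGet b role with
  | none => alSet b role []
  | some _ => b

def pvStep2 (m : List (String × Int)) (level : String) : List (String × Int) :=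
  match alGet m level with
  | none => alSet m level 0
  | some _ => m

def pvStep (b : List (String × List (String × Int))) (role level : String) :
    List (String × List (String × Int)) :=
  alSet (pvStep1 b role) role
    (alSet (pvStep2 ((alGet (pvStep1 b role) role).getD []) level) level
      ((alGet (pvStep2 ((alGet (pvStep1 b role) role).getD []) level) level).getD 0 + 1))

theorem pvStep1_of_some {b : List (String × List (String × Int))} {r : String}
    {i : List (String × Int)} (h : alGet b r = some i) : pvStep1 b r = b := by
  unfold pvStep1; rw [h]

theorem pvStep1_of_none {b : List (String × List (String × Int))} {r : String}
    (h : alGet b r = none) : pvStep1 b r = alSet b r [] := by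
  unfold pvStep1; rw [h]

theorem pvStep2_of_some {m : List (String × Int)} {l : String} {n : Int}
    (h : alGet m l = some n) : pvStep2 m l = m := by
  unfold pvStep2; rw [h]

theorem pvStep2_of_none {m : List (String × Int)} {l : String}
    (h : alGet m l = none) : pvStep2 m l = alSet m l 0 := by
  unfold pvStep2; rw [h]

theorem alGet_map {β : Type} (m : List String) (f : String → β) (r : String) :
    alGet (m.map (fun x => (x, f x))) r = if r ∈ m then some (f r) else none := by
  induction m with
  | nil => simp [alGet]
  | cons x t ih =>
    simp only [List.map_cons, alGet, List.mem_cons]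
    by_cases hx : x = r
    · subst hx; simp
    · simp [hx, ih, Ne.symm hx]

theorem alSet_map_of_mem {β : Type} (m : List String) (f : String → β) (r : String) (v : β)
    (hm : m.Nodup) (hr : r ∈ m) :
    alSet (m.map (fun x => (x, f x))) r v = m.map (fun x => (x, if x = r then v else f x)) := by
  induction m with
  | nil => cases hr
  | cons x t ih =>
    rcases List.nodup_cons.mp hm with ⟨hx, ht⟩
    by_cases hxr : x = r
    · subst hxr
      have hmap : List.map (fun y => (y, if y = x then v else f y)) t
          = List.map (fun y => (y, f y)) t :=
        List.map_congr_left (fun y hy => by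
          have : y ≠ x := fun h => hx (h ▸ hy)
          simp [this])
      simp [alSet, hmap]
    · have hrt : r ∈ t := by
        cases List.mem_cons.mp hr with
        | inl h => exact absurd h.symm hxr
        | inr h => exact h
      simp [alSet, hxr, ih ht hrt]

theorem alSet_of_not_mem {β : Type} (m : List (String × β)) (r : String) (v : β)
    (h : ∀ p ∈ m, p.1 ≠ r) : alSet m r v = m ++ [(r, v)] := by
  induction m with
  | nil => rfl
  | cons p t ih =>
    have hp : p.1 ≠ r := h p (List.mem_cons_self ..)
    simp [alSet, hp, ih (fun q hq => h q (List.mem_cons_of_mem _ hq))]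

theorem alGet_append_right {β : Type} (m m₂ : List (String × β)) (r : String)
    (h : ∀ p ∈ m, p.1 ≠ r) : alGet (m ++ m₂) r = alGet m₂ r := by
  induction m with
  | nil => rfl
  | cons p t ih =>
    have hp : p.1 ≠ r := h p (List.mem_cons_self ..)
    simp [alGet, hp, ih (fun q hq => h q (List.mem_cons_of_mem _ hq))]

theorem alSet_append_last {β : Type} (m : List (String × β)) (r : String) (w v : β)
    (h : ∀ p ∈ m, p.1 ≠ r) : alSet (m ++ [(r, w)]) r v = m ++ [(r, v)] := by
  induction m with
  | nil => simp [alSet]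
  | cons p t ih =>
    have hp : p.1 ≠ r := h p (List.mem_cons_self ..)
    simp [alSet, hp, ih (fun q hq => h q (List.mem_cons_of_mem _ hq))]

theorem map_keys_ne {β : Type} (m : List String) (f : String → β) (r : String) (hr : r ∉ m) :
    ∀ p ∈ m.map (fun x => (x, f x)), p.1 ≠ r := by
  intro p hp
  rcases List.mem_map.mp hp with ⟨x, hx, rfl⟩
  exact fun h => hr (h ▸ hx)

theorem pvLv_append (ks : List (String × String)) (r l r' : String) :
    pvLv (ks ++ [(r, l)]) r' = pvLv ks r' ++ (if r = r' then [l] else []) := by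
  unfold pvLv
  rw [List.filter_append]
  by_cases h : r = r' <;> simp [h]

theorem pvInner_append_ne (ks : List (String × String)) (r l r' : String) (h : r ≠ r') :
    pvInner (ks ++ [(r, l)]) r' = pvInner ks r' := by
  unfold pvInner
  rw [pvLv_append, if_neg h, List.append_nil]

theorem pvNest_step (ks : List (String × String)) (r l : String) :
    pvStep (pvNest ks) r l = pvNest (ks ++ [(r, l)]) := by
  have hmapfst : (ks ++ [(r, l)]).map (fun k => k.1) = ks.map (fun k => k.1) ++ [r] := by simp
  rw [pvNest_eq, pvNest_eq, hmapfst, PySem.Set.ofList_append_singleton]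
  have hRn : (PySem.Set.ofList (ks.map (fun k => k.1))).Nodup := PySem.Set.nodup_ofList _
  by_cases hr : r ∈ ks.map (fun k => k.1)
  · -- the role was seen before
    have hrR : r ∈ PySem.Set.ofList (ks.map (fun k => k.1)) := (PySem.Set.mem_ofList _ _).mpr hr
    have hget : alGet ((PySem.Set.ofList (ks.map (fun k => k.1))).map (fun x => (x, pvInner ks x))) r
        = some (pvInner ks r) := by
      rw [alGet_map]; simp [hrR]
    rw [PySem.Set.add_of_mem hrR]
    unfold pvStep
    rw [pvStep1_of_some hget, hget]
    simp only [Option.getD_some]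
    by_cases hl : l ∈ pvLv ks r
    · -- the level was seen before for this role
      have hlL : l ∈ PySem.Set.ofList (pvLv ks r) := (PySem.Set.mem_ofList _ _).mpr hl
      have hgetl : alGet (pvInner ks r) l = some ((pvLv ks r).count l : Int) := by
        unfold pvInner; rw [alGet_map]; simp [hlL]
      rw [pvStep2_of_some hgetl, hgetl]
      simp only [Option.getD_some]
      have hin : alSet (pvInner ks r) l (((pvLv ks r).count l : Int) + 1)
          = (PySem.Set.ofList (pvLv ks r)).map
              (fun l' => (l', if l' = l then ((pvLv ks r).count l : Int) + 1
                              else ((pvLv ks r).count l' : Int))) := by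
        unfold pvInner
        exact alSet_map_of_mem _ _ _ _ (PySem.Set.nodup_ofList _) hlL
      rw [hin, alSet_map_of_mem _ _ _ _ hRn hrR]
      apply List.map_congr_left
      intro r' hr'
      by_cases h' : r' = r
      · subst h'
        rw [if_pos rfl]
        congr 1
        unfold pvInner
        rw [pvLv_append, if_pos rfl, PySem.Set.ofList_append_singleton,
            PySem.Set.add_of_mem hlL]
        apply List.map_congr_left
        intro l' hl'
        by_cases h'' : l' = l
        · subst h''
          rw [if_pos rfl]
          have hc : (pvLv ks r' ++ [l']).count l' = (pvLv ks r').count l' + 1 := by simp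
          rw [hc]
          push_cast
          ring_nf
        · rw [if_neg h'']
          have hc0 : ([l].count l') = 0 := List.count_eq_zero.mpr (by simp [h''])
          have hc : (pvLv ks r' ++ [l]).count l' = (pvLv ks r').count l' := by
            simp [List.count_append, hc0]
          rw [hc]
      · rw [if_neg h', pvInner_append_ne _ _ _ _ (fun he => h' he.symm)]
    · -- new level for an existing role
      have hlL : l ∉ PySem.Set.ofList (pvLv ks r) := fun h => hl ((PySem.Set.mem_ofList _ _).mp h)
      have hkeys := map_keys_ne (PySem.Set.ofList (pvLv ks r))
        (fun l' => ((pvLv ks r).count l' : Int)) l hlL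
      have hgetl : alGet (pvInner ks r) l = none := by
        unfold pvInner; rw [alGet_map]; simp [hlL]
      have hstep2 : pvStep2 (pvInner ks r) l = pvInner ks r ++ [(l, 0)] := by
        rw [pvStep2_of_none hgetl]
        unfold pvInner
        exact alSet_of_not_mem _ _ _ hkeys
      rw [hstep2]
      have hget2 : alGet (pvInner ks r ++ [(l, (0 : Int))]) l = some 0 := by
        conv_lhs => rw [pvInner]
        rw [alGet_append_right _ _ _ hkeys]
        simp [alGet]
      rw [hget2]
      simp only [Option.getD_some]
      have hset2 : alSet (pvInner ks r ++ [(l, (0 : Int))]) l (0 + 1)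
          = pvInner ks r ++ [(l, 1)] := by
        conv_lhs => rw [pvInner]
        rw [alSet_append_last _ _ _ _ hkeys]
        norm_num
        rfl
      rw [hset2, alSet_map_of_mem _ _ _ _ hRn hrR]
      apply List.map_congr_left
      intro r' hr'
      by_cases h' : r' = r
      · subst h'
        rw [if_pos rfl]
        congr 1
        unfold pvInner
        rw [pvLv_append, if_pos rfl, PySem.Set.ofList_append_singleton,
            PySem.Set.add_of_not_mem hlL, List.map_append]
        congr 1
        · apply List.map_congr_left
          intro l' hl'
          have h'' : l' ≠ l := fun he => hlL (he ▸ hl')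
          have hc0 : ([l].count l') = 0 := List.count_eq_zero.mpr (by simp [h''])
          have hc : (pvLv ks r' ++ [l]).count l' = (pvLv ks r').count l' := by
            simp [List.count_append, hc0]
          rw [hc]
        · have h0 : (pvLv ks r').count l = 0 := List.count_eq_zero.mpr hl
          simp [List.count_append, h0]
      · rw [if_neg h', pvInner_append_ne _ _ _ _ (fun he => h' he.symm)]
  · -- fresh role
    have hrR : r ∉ PySem.Set.ofList (ks.map (fun k => k.1)) :=
      fun h => hr ((PySem.Set.mem_ofList _ _).mp h)
    have hkeys := map_keys_ne (PySem.Set.ofList (ks.map (fun k => k.1))) (pvInner ks) r hrR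
    have hget : alGet ((PySem.Set.ofList (ks.map (fun k => k.1))).map (fun x => (x, pvInner ks x))) r
        = none := by
      rw [alGet_map]; simp [hrR]
    unfold pvStep
    have hstep1 : pvStep1 ((PySem.Set.ofList (ks.map (fun k => k.1))).map (fun x => (x, pvInner ks x))) r
        = (PySem.Set.ofList (ks.map (fun k => k.1))).map (fun x => (x, pvInner ks x)) ++ [(r, [])] := by
      rw [pvStep1_of_none hget]
      exact alSet_of_not_mem _ _ _ hkeys
    rw [hstep1]
    have hget2 : alGet ((PySem.Set.ofList (ks.map (fun k => k.1))).map (fun x => (x, pvInner ks x))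
        ++ [(r, [])]) r = some [] := by
      rw [alGet_append_right _ _ _ hkeys]
      simp [alGet]
    rw [hget2]
    simp only [Option.getD_some]
    have hstep2 : pvStep2 [] l = [(l, 0)] := by
      rw [pvStep2_of_none rfl]; rfl
    rw [hstep2]
    have hget3 : alGet [(l, (0 : Int))] l = some 0 := by simp [alGet]
    rw [hget3]
    simp only [Option.getD_some]
    have hset2 : alSet [(l, (0 : Int))] l (0 + 1) = [(l, 1)] := by simp [alSet]
    rw [hset2, alSet_append_last _ _ _ _ hkeys]
    rw [PySem.Set.add_of_not_mem hrR, List.map_append]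
    congr 1
    · apply List.map_congr_left
      intro r' hr'
      have hne : r ≠ r' := fun he => hrR (he ▸ hr')
      rw [pvInner_append_ne _ _ _ _ hne]
    · have hnil : pvLv ks r = [] := by
        unfold pvLv
        have hf : ks.filter (fun k => k.1 == r) = [] :=
          List.filter_eq_nil_iff.mpr
            (fun k hk h => hr ((eq_of_beq h) ▸ List.mem_map_of_mem hk))
        rw [hf]
        rfl
      simp only [List.map_cons, List.map_nil]
      congr 1
      congr 1
      unfold pvInner
      rw [pvLv_append, if_pos rfl, hnil, List.nil_append]
      have h1 : PySem.Set.ofList [l] = [l] := rfl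
      rw [h1]
      simp [List.count_singleton]

theorem portA_foldl (wd : List (List (String × String))) :
    extract_baseline_fte_py wd = (wd.map pvKey).foldl (fun b k => pvStep b k.1 k.2) [] := by
  rw [extract_baseline_fte_py, List.foldl_map]
  rfl

theorem foldl_pvStep_eq_nest (ks : List (String × String)) :
    ks.foldl (fun b k => pvStep b k.1 k.2) [] = pvNest ks := by
  induction ks using List.reverseRecOn with
  | nil => rfl
  | append_singleton ks k ih =>
    rw [List.foldl_append, List.foldl_cons, List.foldl_nil, ih, pvNest_step]

theorem portA_eq_nest (wd : List (List (String × String))) :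
    extract_baseline_fte_py wd = pvNest (wd.map pvKey) := by
  rw [portA_foldl, foldl_pvStep_eq_nest]

theorem portB_eq_nest (wd : List (List (String × String))) :
    extract_baseline_fte_py_alt wd = pvNest (wd.map pvKey) := rfl

-- ===== VERDICT (by name: the statement is the Claim_ definition above) =====
theorem extract_baseline_fte_py_spec : Claim_equal_extract_baseline_fte_py := by
  intro wd _
  unfold Spec_extract_baseline_fte_py
  rw [portA_eq_nest, portB_eq_nest]
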